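-- pv_equiv track=rewrite | github.com/jacksonsantosjr/5S-Digital | apps/backend-ai/src/services/deduplication_service.py | identify_duplicates
-- ===== SOURCE A (Python) =====
-- from typing import List, Dict, Any
--
-- def identify_duplicates(files_metadata: List[Dict[str, Any]]) -> List[Dict[str, Any]]:
--     """
--     Identifica duplicatas baseadas em hash (exatas) e sugere duplicatas semânticas.
--     files_metadata deve conter: {'id': str, 'name': str, 'hash': str, 'embedding': Optional[List[float]]}
--     """
--     seen_hashes = {}
--     duplicates = []
--
--     for file in files_metadata:
--         f_hash = file.get('hash')
--         if f_hash in seen_hashes: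
--             duplicates.append({
--                 "original": seen_hashes[f_hash],
--                 "duplicate": file['id'],
--                 "type": "exact",
--                 "reason": "Hash binário idêntico"
--             })
--         else:
--             seen_hashes[f_hash] = file['id']
--
--     # Simulação de similaridade semântica (conceitual)
--     # Se dois arquivos têm nomes muito parecidos ou conteúdos próximos, a IA sinaliza
--     return duplicates
-- ===== SOURCE B (Python) =====
-- def identify_duplicates(files_metadata):
--     # Two-pass: build an index hash -> (first position, first id), then scan
--     # again emitting a record for every file not at its hash's first position.
--     first = {}
--     for i, file in enumerate(files_metadata):
--         h = file.get('hash')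
--         if h not in first:
--             first[h] = (i, file['id'])
--     duplicates = []
--     for i, file in enumerate(files_metadata):
--         first_index, first_id = first[file.get('hash')]
--         if first_index != i:
--             duplicates.append({
--                 "original": first_id,
--                 "duplicate": file['id'],
--                 "type": "exact",
--                 "reason": "Hash binário idêntico"
--             })
--     return duplicates
-- ===== Notes on version B (the rewrite author's own statement) =====
-- stated objective: alternative
-- what changed: Replaces A's single fold that interleaves dict lookups/inserts with output appending by two separate passes: first build an index from each hash to the (index, id) of its first occurrence, then scan again emitting a record for every file whose position differs from its hash's first index.
import Mathlib
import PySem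

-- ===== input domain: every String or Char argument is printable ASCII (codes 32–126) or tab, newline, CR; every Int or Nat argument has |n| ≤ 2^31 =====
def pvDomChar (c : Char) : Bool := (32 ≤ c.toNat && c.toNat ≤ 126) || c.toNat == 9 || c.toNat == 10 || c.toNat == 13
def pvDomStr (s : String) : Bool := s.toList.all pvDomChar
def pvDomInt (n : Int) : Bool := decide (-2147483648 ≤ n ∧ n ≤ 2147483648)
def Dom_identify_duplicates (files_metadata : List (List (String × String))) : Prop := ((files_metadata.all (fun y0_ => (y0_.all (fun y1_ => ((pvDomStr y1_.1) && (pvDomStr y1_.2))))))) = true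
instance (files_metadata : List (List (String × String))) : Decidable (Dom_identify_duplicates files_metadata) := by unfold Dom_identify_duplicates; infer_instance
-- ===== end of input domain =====

-- B replaces A's single fold with two passes (build a hash→first-(index,id) index, then
-- scan emitting records at non-first positions); objective: alternative decomposition, same cost.

-- file.get('hash') : Option String (none = key absent)
def pvHashOf (file : List (String × String)) : Option String :=
  (PySem.Dict.mk file).get? "hash"

-- file['id'] (KeyError = none; total form, Pre_ guarantees the key is present)
def pvIdOf (file : List (String × String)) : String :=
  ((PySem.Dict.mk file).get? "id").getD ""

def pvDupRec (orig dup : String) : List (String × String) :=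
  [("original", orig), ("duplicate", dup), ("type", "exact"), ("reason", "Hash binário idêntico")]

-- ===== PORT A =====
def identify_duplicates (files_metadata : List (List (String × String))) : List (List (String × String)) :=
  (files_metadata.foldl
    (fun (st : PySem.Dict (Option String) String × List (List (String × String))) file =>
      let f_hash := pvHashOf file
      match st.1.get? f_hash with
      | some orig => (st.1, st.2 ++ [pvDupRec orig (pvIdOf file)])
      | none => (st.1.insert f_hash (pvIdOf file), st.2))
    (PySem.Dict.empty, [])).2

-- ===== PORT B =====
def identify_duplicates_alt (files_metadata : List (List (String × String))) : List (List (String × String)) :=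
  let first := (PySem.List.enumerate files_metadata 0).foldl
    (fun (d : PySem.Dict (Option String) (Int × String)) p =>
      let h := pvHashOf p.2
      if d.contains h then d else d.insert h (p.1, pvIdOf p.2))
    PySem.Dict.empty
  (PySem.List.enumerate files_metadata 0).foldl
    (fun (dups : List (List (String × String))) p =>
      let fi := first.getD (pvHashOf p.2) (0, "")
      if fi.1 ≠ p.1 then dups ++ [pvDupRec fi.2 (pvIdOf p.2)] else dups)
    []

-- ===== PRECONDITION & SPEC =====
-- Pre_: every file dict carries the key 'id' — exactly where A (file['id']) returns instead of raising KeyError.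
def Pre_identify_duplicates (files_metadata : List (List (String × String))) : Prop :=
  (files_metadata.all (fun file => ((PySem.Dict.mk file).get? "id").isSome)) = true
instance (files_metadata : List (List (String × String))) : Decidable (Pre_identify_duplicates files_metadata) := by unfold Pre_identify_duplicates; infer_instance

def pvWitness_identify_duplicates : (List (List (String × String))) :=
  [[("id", "a"), ("hash", "h1")], [("id", "b"), ("hash", "h1")], [("id", "c")]]

def Spec_identify_duplicates (files_metadata : List (List (String × String))) (out : List (List (String × String))) : Prop := out = identify_duplicates_alt files_metadata
instance (files_metadata : List (List (String × String))) (out : List (List (String × String))) : Decidable (Spec_identify_duplicates files_metadata out) := by unfold Spec_identify_duplicates; infer_instance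

-- ===== CLAIM (what is proved, stated in full; the proofs are below) =====
def Claim_equal_identify_duplicates : Prop := ∀ (files_metadata : List (List (String × String))), Dom_identify_duplicates files_metadata → Pre_identify_duplicates files_metadata → Spec_identify_duplicates files_metadata (identify_duplicates files_metadata)

-- ===== LEMMAS AND PROOFS =====

-- recursive characterisation of A's loop body (cons-based output)
def pvSpecA (seen : PySem.Dict (Option String) String) : List (List (String × String)) → List (List (String × String))
  | [] => []
  | f :: r =>
    match seen.get? (pvHashOf f) with
    | some orig => pvDupRec orig (pvIdOf f) :: pvSpecA seen r
    | none => pvSpecA (seen.insert (pvHashOf f) (pvIdOf f)) r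

-- first occurrence (position, id) of hash h in fs, counting from i
def pvFirstOcc (i : Int) (fs : List (List (String × String))) (h : Option String) : Option (Int × String) :=
  match fs with
  | [] => none
  | f :: r => if pvHashOf f = h then some (i, pvIdOf f) else pvFirstOcc (i + 1) r h

theorem pvFoldA_eq_specA (fs : List (List (String × String)))
    (seen : PySem.Dict (Option String) String) (dups : List (List (String × String))) :
    (fs.foldl
      (fun (st : PySem.Dict (Option String) String × List (List (String × String))) file =>
        let f_hash := pvHashOf file
        match st.1.get? f_hash with
        | some orig => (st.1, st.2 ++ [pvDupRec orig (pvIdOf file)])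
        | none => (st.1.insert f_hash (pvIdOf file), st.2))
      (seen, dups)).2 = dups ++ pvSpecA seen fs := by
  induction fs generalizing seen dups with
  | nil => simp [pvSpecA]
  | cons f r ih =>
    simp only [List.foldl_cons, pvSpecA]
    cases hg : seen.get? (pvHashOf f) with
    | some orig => simp [ih]
    | none => simp [ih]

theorem pvBuild_get (fs : List (List (String × String))) (i : Int)
    (d : PySem.Dict (Option String) (Int × String)) (h : Option String) :
    ((PySem.List.enumerate fs i).foldl
      (fun (d : PySem.Dict (Option String) (Int × String)) p =>
        let h := pvHashOf p.2
        if d.contains h then d else d.insert h (p.1, pvIdOf p.2)) d).get? h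
    = (d.get? h).or (pvFirstOcc i fs h) := by
  induction fs generalizing i d with
  | nil => simp [PySem.List.enumerate_nil, pvFirstOcc]
  | cons f r ih =>
    rw [PySem.List.enumerate_cons]
    simp only [List.foldl_cons, pvFirstOcc]
    by_cases hc : d.contains (pvHashOf f) = true
    · have hs : (d.get? (pvHashOf f)).isSome = true := by
        rw [← PySem.Dict.contains_eq_isSome_get? d (pvHashOf f)]; exact hc
      rcases Option.isSome_iff_exists.mp hs with ⟨v, hv⟩
      rw [if_pos hc, ih]
      by_cases he : pvHashOf f = h
      · subst he; rw [hv]; simp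
      · rw [if_neg he]
    · rw [if_neg hc, ih]
      by_cases he : pvHashOf f = h
      · subst he
        have hn : d.get? (pvHashOf f) = none := by
          rw [PySem.Dict.get?_eq_none_iff_contains]
          simpa using hc
        rw [PySem.Dict.get?_insert_self, hn]
        simp
      · rw [PySem.Dict.get?_insert_of_ne _ _ (fun hh => he hh.symm)]
        rw [if_neg he]

theorem pvEmit_eq_specA (R : List (List (String × String)))
    (seen : PySem.Dict (Option String) String) (i : Int)
    (D : PySem.Dict (Option String) (Int × String)) (dups : List (List (String × String)))
    (h1 : ∀ h id, seen.get? h = some id → ∃ j, j < i ∧ D.get? h = some (j, id))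
    (h2 : ∀ h, seen.get? h = none → D.get? h = pvFirstOcc i R h) :
    ((PySem.List.enumerate R i).foldl
      (fun (dups : List (List (String × String))) p =>
        let fi := D.getD (pvHashOf p.2) (0, "")
        if fi.1 ≠ p.1 then dups ++ [pvDupRec fi.2 (pvIdOf p.2)] else dups) dups)
    = dups ++ pvSpecA seen R := by
  induction R generalizing seen i dups with
  | nil => simp [PySem.List.enumerate_nil, pvSpecA]
  | cons f r ih =>
    rw [PySem.List.enumerate_cons]
    simp only [List.foldl_cons, pvSpecA]
    cases hg : seen.get? (pvHashOf f) with
    | some orig =>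
      rcases h1 _ _ hg with ⟨j, hj, hD⟩
      have hget : D.getD (pvHashOf f) (0, "") = (j, orig) :=
        PySem.Dict.getD_of_get?_eq_some D (0, "") hD
      rw [hget]
      have hne : j ≠ i := by omega
      rw [if_pos hne]
      rw [ih seen (i + 1) _ (fun h id hh => by
        rcases h1 h id hh with ⟨j, hj, hD2⟩; exact ⟨j, by omega, hD2⟩)]
      · simp
      · intro h hh
        have hne2 : pvHashOf f ≠ h := fun he => by rw [he] at hg; rw [hg] at hh; cases hh
        have := h2 h hh
        rwa [pvFirstOcc, if_neg hne2] at this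
    | none =>
      have hD : D.get? (pvHashOf f) = some (i, pvIdOf f) := by
        rw [h2 _ hg, pvFirstOcc, if_pos rfl]
      have hget : D.getD (pvHashOf f) (0, "") = (i, pvIdOf f) :=
        PySem.Dict.getD_of_get?_eq_some D (0, "") hD
      rw [hget]
      rw [if_neg (by simp : ¬((i, pvIdOf f).1 ≠ i))]
      rw [ih (seen.insert (pvHashOf f) (pvIdOf f)) (i + 1) dups]
      · intro h id hh
        by_cases he : h = pvHashOf f
        · subst he
          rw [PySem.Dict.get?_insert_self] at hh
          cases hh
          exact ⟨i, by omega, hD⟩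
        · rw [PySem.Dict.get?_insert_of_ne _ _ he] at hh
          rcases h1 _ _ hh with ⟨j, hj, hDj⟩
          exact ⟨j, by omega, hDj⟩
      · intro h hh
        by_cases he : h = pvHashOf f
        · subst he; rw [PySem.Dict.get?_insert_self] at hh; cases hh
        · rw [PySem.Dict.get?_insert_of_ne _ _ he] at hh
          have := h2 h hh
          rwa [pvFirstOcc, if_neg (fun hx => he hx.symm)] at this

-- ===== VERDICT (by name: the statement is the Claim_ definition above) =====
theorem identify_duplicates_spec : Claim_equal_identify_duplicates := by
  intro fs _ _
  unfold Spec_identify_duplicates identify_duplicates identify_duplicates_alt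
  rw [pvFoldA_eq_specA]
  rw [pvEmit_eq_specA fs PySem.Dict.empty 0 _ []]
  · intro h id hh; rw [PySem.Dict.get?_empty] at hh; cases hh
  · intro h _
    rw [pvBuild_get fs 0 PySem.Dict.empty h, PySem.Dict.get?_empty, Option.none_or]
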